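-- pv_equiv track=rewrite | github.com/djaychela/advent_of_code | 2023/12_02.py | check_group
-- ===== SOURCE A (Python) =====
-- def check_group(springs, groups):
--     current = 0
--     seen = []
--     for c in springs:
--         if c == ".":
--             if current > 0:
--                 seen.append(current)
--             current = 0
--         elif c == "#":
--             current += 1
--     if current > 0:
--        seen.append(current)
--     return seen == groups
-- ===== SOURCE B (Python) =====
-- def check_group(springs, groups):
--     cleaned = "".join(c for c in springs if c in "#.")
--     seen = [len(run) for run in cleaned.split(".") if run]
--     return seen == groups
-- ===== Notes on version B (the rewrite author's own statement) =====
-- stated objective: idiomatic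
-- what changed: Replaces the manual counter-with-flush accumulator loop by a declarative pipeline: filter to '#'/'.', split on '.', keep the lengths of the non-empty pieces, compare.
import Mathlib
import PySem

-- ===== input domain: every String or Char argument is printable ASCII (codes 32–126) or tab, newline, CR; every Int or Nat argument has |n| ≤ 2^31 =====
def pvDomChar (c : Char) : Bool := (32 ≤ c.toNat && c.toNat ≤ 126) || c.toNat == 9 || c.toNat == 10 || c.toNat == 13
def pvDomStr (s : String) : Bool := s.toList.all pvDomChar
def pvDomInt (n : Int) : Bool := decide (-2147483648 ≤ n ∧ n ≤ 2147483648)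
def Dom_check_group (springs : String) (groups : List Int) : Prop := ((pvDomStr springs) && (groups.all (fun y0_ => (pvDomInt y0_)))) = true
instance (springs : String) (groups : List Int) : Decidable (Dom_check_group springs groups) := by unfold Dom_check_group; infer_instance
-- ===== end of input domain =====

-- B replaces A's manual counter-with-flush loop by an idiomatic pipeline: filter to '#'/'.', split on '.', lengths of non-empty pieces.


-- ===== PORT A =====
-- one loop iteration of A: '.' flushes the current run, '#' extends it, anything else is ignored
def pvStepA (st : Int × List Int) (c : Char) : Int × List Int :=
  if c = '.' then
    (0, if st.1 > 0 then st.2 ++ [st.1] else st.2)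
  else if c = '#' then (st.1 + 1, st.2)
  else st

def check_group (springs : String) (groups : List Int) : Bool :=
  let st := springs.toList.foldl pvStepA (0, [])
  let seen := if st.1 > 0 then st.2 ++ [st.1] else st.2
  seen == groups

-- ===== PORT B =====
def check_group_alt (springs : String) (groups : List Int) : Bool :=
  -- cleaned = "".join(c for c in springs if c in "#.")
  let cleaned := springs.toList.filter (fun c => c == '#' || c == '.')
  -- seen = [len(run) for run in cleaned.split(".") if run]
  let seen := ((PySem.Chars.splitOn cleaned ['.']).filter (fun r => !r.isEmpty)).map
      (fun r => (r.length : Int))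
  seen == groups

-- ===== PRECONDITION & SPEC =====
def Spec_check_group (springs : String) (groups : List Int) (out : Bool) : Prop := out = check_group_alt springs groups
instance (springs : String) (groups : List Int) (out : Bool) : Decidable (Spec_check_group springs groups out) := by unfold Spec_check_group; infer_instance

-- ===== CLAIM (what is proved, stated in full; the proofs are below) =====
def Claim_equal_check_group : Prop := ∀ (springs : String) (groups : List Int), Dom_check_group springs groups → Spec_check_group springs groups (check_group springs groups)

-- ===== LEMMAS AND PROOFS =====

-- reference split-on-'.' (structural recursion), proved equal to PySem.Chars.splitOn · ['.']
def pvSplit : List Char → List (List Char)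
  | [] => [[]]
  | c :: t =>
    if c = '.' then [] :: pvSplit t
    else
      match pvSplit t with
      | [] => [[c]]
      | p :: ps => (c :: p) :: ps

lemma pvSplit_ne_nil (cs : List Char) : pvSplit cs ≠ [] := by
  cases cs with
  | nil => simp [pvSplit]
  | cons c t =>
    simp only [pvSplit]
    split
    · simp
    · cases h : pvSplit t <;> simp

lemma pvGo_eq (fuel : Nat) (l cur : List Char) (accs : List (List Char))
    (h : l.length < fuel) :
    PySem.Chars.splitOn.go ['.'] fuel l cur accs =
      accs.reverse ++
        (match pvSplit l with
         | [] => []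
         | p :: ps => (cur.reverse ++ p) :: ps) := by
  induction fuel generalizing l cur accs with
  | zero => omega
  | succ fuel ih =>
    cases l with
    | nil =>
      simp [PySem.Chars.splitOn.go, pvSplit]
    | cons c rest =>
      by_cases hc : c = '.'
      · subst hc
        have hpre : List.isPrefixOf ['.'] ('.' :: rest) = true := by
          simp [List.isPrefixOf]
        rw [PySem.Chars.splitOn.go]
        simp only [hpre, if_true]
        rw [show List.drop ['.'].length ('.' :: rest) = rest from rfl]
        rw [ih rest [] (cur.reverse :: accs) (by simpa using Nat.lt_of_succ_lt_succ (by simpa using h))]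
        simp only [pvSplit, if_true]
        cases hs : pvSplit rest with
        | nil => exact absurd hs (pvSplit_ne_nil rest)
        | cons p ps => simp
      · have hpre : List.isPrefixOf ['.'] (c :: rest) = false := by
          simp [List.isPrefixOf]
          exact fun he => hc he.symm
        rw [PySem.Chars.splitOn.go]
        simp only [hpre, List.length_cons, Bool.false_eq_true, if_false]
        rw [ih rest (c :: cur) accs (by simpa using Nat.lt_of_succ_lt_succ (by simpa using h))]
        simp only [pvSplit, if_neg hc]
        cases hs : pvSplit rest with
        | nil => exact absurd hs (pvSplit_ne_nil rest)
        | cons p ps => simp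

lemma pvSplitOn_eq (l : List Char) : PySem.Chars.splitOn l ['.'] = pvSplit l := by
  rw [PySem.Chars.splitOn, pvGo_eq (l.length + 1) l [] [] (by omega)]
  cases hs : pvSplit l with
  | nil => exact absurd hs (pvSplit_ne_nil l)
  | cons p ps => simp

-- the run lengths A's loop will still emit, given the pending run length `cur`
def pvF : List Char → Int → List Int
  | [], cur => if cur > 0 then [cur] else []
  | c :: t, cur =>
    if c = '.' then (if cur > 0 then [cur] else []) ++ pvF t 0
    else pvF t (cur + 1)

lemma pvFoldA (cs : List Char) (cur : Int) (seen : List Int)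
    (h : ∀ c ∈ cs, c = '#' ∨ c = '.') :
    (let st := cs.foldl pvStepA (cur, seen);
     if st.1 > 0 then st.2 ++ [st.1] else st.2) = seen ++ pvF cs cur := by
  induction cs generalizing cur seen with
  | nil => simp [pvF]; split <;> simp
  | cons c t ih =>
    have hc := h c (by simp)
    have ht : ∀ c ∈ t, c = '#' ∨ c = '.' := fun x hx => h x (by simp [hx])
    rcases hc with hc | hc <;> subst hc
    · have h1 : pvStepA (cur, seen) '#' = (cur + 1, seen) := by simp [pvStepA]
      have h2 : pvF ('#' :: t) cur = pvF t (cur + 1) := by simp [pvF]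
      simp only [List.foldl_cons, h1, h2]
      exact ih (cur + 1) seen ht
    · have h1 : pvStepA (cur, seen) '.' = (0, if cur > 0 then seen ++ [cur] else seen) := by
        simp [pvStepA]
      have h2 : pvF ('.' :: t) cur = (if cur > 0 then [cur] else []) ++ pvF t 0 := by
        simp [pvF]
      simp only [List.foldl_cons, h1, h2]
      rw [ih 0 _ ht]
      split <;> simp

lemma pvFoldA_filter (cs : List Char) (st : Int × List Int) :
    cs.foldl pvStepA st = (cs.filter (fun c => c == '#' || c == '.')).foldl pvStepA st := by
  induction cs generalizing st with
  | nil => rfl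
  | cons c t ih =>
    by_cases h : (c == '#' || c == '.') = true
    · simp [h, ih]
    · have h1 : ¬ c = '.' := by simp at h; exact fun he => h.2 he
      have h2 : ¬ c = '#' := by simp at h; exact fun he => h.1 he
      simp [h, pvStepA, h1, h2, ih]

-- lengths of the non-empty pieces
def pvLens (ps : List (List Char)) : List Int :=
  (ps.filter (fun r => !r.isEmpty)).map (fun r => (r.length : Int))

lemma pvLens_cons (p : List Char) (ps : List (List Char)) :
    pvLens (p :: ps) = (if (p.length : Int) > 0 then [(p.length : Int)] else []) ++ pvLens ps := by
  cases p <;> simp [pvLens]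

lemma pvF_split (cs : List Char) (cur : Int) :
    pvF cs cur =
      (match pvSplit cs with
       | [] => []
       | p :: ps => (if cur + (p.length : Int) > 0 then [cur + (p.length : Int)] else []) ++ pvLens ps) := by
  induction cs generalizing cur with
  | nil => simp [pvF, pvSplit, pvLens]
  | cons c t ih =>
    by_cases hc : c = '.'
    · subst hc
      cases hs : pvSplit t with
      | nil => exact absurd hs (pvSplit_ne_nil t)
      | cons p ps =>
        simp only [pvF, pvSplit, if_true, ih 0, hs]
        rw [pvLens_cons]
        simp
    · cases hs : pvSplit t with
      | nil => exact absurd hs (pvSplit_ne_nil t)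
      | cons p ps =>
        simp only [pvF, pvSplit, if_neg hc, ih (cur + 1), hs]
        have hl : cur + 1 + (p.length : Int) = cur + ((c :: p).length : Int) := by
          simp only [List.length_cons]; push_cast; ring
        simp only [hl]

lemma pvSeen_eq (springs : String) :
    (let st := springs.toList.foldl pvStepA (0, []);
     if st.1 > 0 then st.2 ++ [st.1] else st.2) =
    ((PySem.Chars.splitOn (springs.toList.filter (fun c => c == '#' || c == '.')) ['.']).filter
        (fun r => !r.isEmpty)).map (fun r => (r.length : Int)) := by
  rw [show ((PySem.Chars.splitOn (springs.toList.filter (fun c => c == '#' || c == '.')) ['.']).filter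
        (fun r => !r.isEmpty)).map (fun r => (r.length : Int)) =
      pvLens (pvSplit (springs.toList.filter (fun c => c == '#' || c == '.'))) by
    rw [pvSplitOn_eq]; rfl]
  simp only [pvFoldA_filter springs.toList (0, [])]
  rw [pvFoldA _ 0 [] (by intro c hc; simp at hc; rcases hc.2 with h | h <;> simp [h])]
  rw [pvF_split]
  cases hs : pvSplit (springs.toList.filter (fun c => c == '#' || c == '.')) with
  | nil => exact absurd hs (pvSplit_ne_nil _)
  | cons p ps => rw [pvLens_cons]; simp

-- ===== VERDICT (by name: the statement is the Claim_ definition above) =====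
theorem check_group_spec : Claim_equal_check_group := by
  intro springs groups _
  unfold Spec_check_group check_group check_group_alt
  exact congrArg (fun s => s == groups) (pvSeen_eq springs)
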